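-- pv_equiv track=rewrite | github.com/hehaivictor/yance | backend/app/core/evidence_grounding.py | _best_lines
-- ===== SOURCE A (Python) =====
-- from typing import Any
--
-- def _best_lines(lines: list[str], current: dict[str, Any], limit: int) -> list[str]:
--     keywords = [
--         str(current.get("role_title") or ""),
--         str(current.get("work_scope") or ""),
--         str(current.get("research_direction") or ""),
--         str(current.get("pain_point") or ""),
--         "研究方向",
--         "业务",
--         "产品",
--         "问题",
--         "场景",
--         "数据",
--     ]
--     ranked: list[tuple[int, str]] = []
--     for line in lines:
--         score = sum(1 for keyword in keywords if keyword and keyword.lower() in line.lower())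
--         if score:
--             ranked.append((score, line))
--     ranked.sort(key=lambda item: item[0], reverse=True)
--     return [item[1] for item in ranked[:limit]]
-- ===== SOURCE B (Python) =====
-- def _best_lines(lines, current, limit):
--     keywords = [
--         str(current.get("role_title") or ""),
--         str(current.get("work_scope") or ""),
--         str(current.get("research_direction") or ""),
--         str(current.get("pain_point") or ""),
--         "研究方向",
--         "业务",
--         "产品",
--         "问题",
--         "场景",
--         "数据",
--     ]
--     n = len(keywords)
--     # bucket (counting) sort: buckets[s-1] collects, in input order, the lines with score s
--     buckets = [[] for _ in range(n)]
--     for line in lines: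
--         low = line.lower()
--         score = 0
--         for keyword in keywords:
--             if keyword and keyword.lower() in low:
--                 score += 1
--         if score:
--             buckets[score - 1].append(line)
--     ordered = []
--     for s in range(n - 1, -1, -1):
--         ordered.extend(buckets[s])
--     return ordered[:limit]
-- ===== Notes on version B (the rewrite author's own statement) =====
-- stated objective: alternative
-- what changed: Replaces collect-then-comparison-sort with a counting (bucket) sort: each scoring line is appended to a bucket indexed by its score (scores are bounded by the 10 keywords), and buckets are emitted from highest score down, which preserves the stable tie order without calling sort.
import Mathlib
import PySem

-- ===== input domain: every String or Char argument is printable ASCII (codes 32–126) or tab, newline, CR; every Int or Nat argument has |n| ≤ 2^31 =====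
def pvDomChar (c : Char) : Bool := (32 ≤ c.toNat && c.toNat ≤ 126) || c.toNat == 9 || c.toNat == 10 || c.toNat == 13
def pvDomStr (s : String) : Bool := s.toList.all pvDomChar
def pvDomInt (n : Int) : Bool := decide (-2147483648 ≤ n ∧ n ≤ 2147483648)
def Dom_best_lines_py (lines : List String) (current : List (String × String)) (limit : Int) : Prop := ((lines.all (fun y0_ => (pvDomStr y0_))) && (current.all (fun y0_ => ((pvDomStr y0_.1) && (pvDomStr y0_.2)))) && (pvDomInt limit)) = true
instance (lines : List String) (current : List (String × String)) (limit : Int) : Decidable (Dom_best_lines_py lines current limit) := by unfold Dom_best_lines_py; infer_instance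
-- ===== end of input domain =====

-- B bucket-sorts lines by score instead of A's collect-and-comparison-sort; both ports share only
-- the keyword-list construction (identical in both Pythons).

-- shared helper: the keyword list (str(current.get(k) or "") = the stored value, or "" when missing)
def pvKeywords (current : List (String × String)) : List String :=
  [ ((PySem.Dict.mk current).get? "role_title").getD "",
    ((PySem.Dict.mk current).get? "work_scope").getD "",
    ((PySem.Dict.mk current).get? "research_direction").getD "",
    ((PySem.Dict.mk current).get? "pain_point").getD "",
    "研究方向", "业务", "产品", "问题", "场景", "数据" ]

-- ===== PORT A =====
def best_lines_py (lines : List String) (current : List (String × String)) (limit : Int) : List String :=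
  let keywords := pvKeywords current
  let ranked : List (Int × String) := lines.foldl (fun ranked line =>
    let score : Int := (keywords.map (fun keyword =>
      if keyword ≠ "" ∧ PySem.Str.isIn (PySem.Str.lower keyword) (PySem.Str.lower line) then (1 : Int) else 0)).sum
    if score ≠ 0 then ranked ++ [(score, line)] else ranked) []
  (PySem.List.slice (PySem.List.sorted ranked (fun item => item.1) true) none (some limit)).map (fun item => item.2)

-- ===== PORT B =====
def best_lines_py_alt (lines : List String) (current : List (String × String)) (limit : Int) : List String :=
  let keywords := pvKeywords current
  let n := keywords.length
  let buckets : List (List String) := lines.foldl (fun buckets line =>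
    let low := PySem.Str.lower line
    let score : Nat := keywords.foldl (fun score keyword =>
      if keyword ≠ "" ∧ PySem.Str.isIn (PySem.Str.lower keyword) low then score + 1 else score) 0
    if score ≠ 0 then buckets.set (score - 1) (buckets.getD (score - 1) [] ++ [line]) else buckets)
    (List.replicate n [])
  let ordered := (List.range n).reverse.foldl (fun acc s => acc ++ buckets.getD s []) []
  PySem.List.slice ordered none (some limit)

-- ===== PRECONDITION & SPEC =====
def Spec_best_lines_py (lines : List String) (current : List (String × String)) (limit : Int) (out : List String) : Prop := out = best_lines_py_alt lines current limit
instance (lines : List String) (current : List (String × String)) (limit : Int) (out : List String) : Decidable (Spec_best_lines_py lines current limit out) := by unfold Spec_best_lines_py; infer_instance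

-- ===== CLAIM (what is proved, stated in full; the proofs are below) =====
def Claim_equal_best_lines_py : Prop := ∀ (lines : List String) (current : List (String × String)) (limit : Int), Dom_best_lines_py lines current limit → Spec_best_lines_py lines current limit (best_lines_py lines current limit)

-- ===== LEMMAS AND PROOFS =====

-- the number of keywords that hit a line
def pvScore (kws : List String) (line : String) : Nat :=
  kws.countP (fun kw => decide (kw ≠ "" ∧ PySem.Str.isIn (PySem.Str.lower kw) (PySem.Str.lower line)))

lemma pvSumScore (kws : List String) (line : String) :
    ((kws.map (fun kw =>
      if kw ≠ "" ∧ PySem.Str.isIn (PySem.Str.lower kw) (PySem.Str.lower line) then (1 : Int) else 0)).sum)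
      = (pvScore kws line : Int) := by
  have h := PySem.List.sum_map_ite_one_zero
    (p := fun kw => decide (kw ≠ "" ∧ PySem.Str.isIn (PySem.Str.lower kw) (PySem.Str.lower line))) kws
  simpa [pvScore] using h

lemma pvCountLoop (kws : List String) (low : String) (a : Nat) :
    kws.foldl (fun score kw => if kw ≠ "" ∧ PySem.Str.isIn (PySem.Str.lower kw) low then score + 1 else score) a
      = a + kws.countP (fun kw => decide (kw ≠ "" ∧ PySem.Str.isIn (PySem.Str.lower kw) low)) := by
  induction kws generalizing a with
  | nil => simp
  | cons k t ih =>
    simp only [List.foldl_cons, List.countP_cons, decide_eq_true_eq]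
    by_cases h : k ≠ "" ∧ PySem.Str.isIn (PySem.Str.lower k) low
    · rw [if_pos h, ih, if_pos h]; omega
    · rw [if_neg h, ih, if_neg h]; omega

lemma pvScore_le (kws : List String) (line : String) : pvScore kws line ≤ kws.length :=
  List.countP_le_length

-- insertBy passes over a block in which `before` never holds
lemma pvInsertSkip {α : Type} (before : α → α → Bool) (x : α) (as bs : List α)
    (h : ∀ y ∈ as, before x y = false) :
    PySem.List.insertBy before x (as ++ bs) = as ++ PySem.List.insertBy before x bs := by
  induction as with
  | nil => simp
  | cons a t ih =>
    simp only [List.cons_append, PySem.List.insertBy, h a (by simp)]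
    simp [ih (fun y hy => h y (by simp [hy]))]

lemma pvInsertFront {α : Type} (before : α → α → Bool) (x : α) (bs : List α)
    (h : ∀ y ∈ bs, before x y = true) :
    PySem.List.insertBy before x bs = x :: bs := by
  cases bs with
  | nil => rfl
  | cons b t => simp [PySem.List.insertBy, h b (by simp)]

-- pointwise congruence for flatMap (membership form)
lemma pvFlatMapCongr {α β : Type} {l : List α} {f g : α → List β}
    (h : ∀ a ∈ l, f a = g a) : l.flatMap f = l.flatMap g := by
  induction l with
  | nil => rfl
  | cons a t ih =>
    simp only [List.flatMap_cons, h a (by simp), ih (fun b hb => h b (by simp [hb]))]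

-- inserting into a score-grouped list lands at the end of its own score group
lemma pvInsertGrouped (vals : List Int) (hv : vals.Pairwise (fun a b => b < a))
    (x : Int × String) (hx : x.1 ∈ vals) (ps : List (Int × String)) :
    PySem.List.insertBy (fun a b => decide (b.1 < a.1)) x
      (vals.flatMap (fun v => ps.filter (fun p => decide (p.1 = v))))
      = vals.flatMap (fun v => (ps ++ [x]).filter (fun p => decide (p.1 = v))) := by
  induction vals with
  | nil => simp at hx
  | cons v vt ih =>
    have hvt : vt.Pairwise (fun a b => b < a) := (List.pairwise_cons.mp hv).2
    have hlt : ∀ w ∈ vt, w < v := (List.pairwise_cons.mp hv).1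
    simp only [List.flatMap_cons]
    by_cases hxv : x.1 = v
    · have hskip : ∀ y ∈ ps.filter (fun p => decide (p.1 = v)),
          (fun (a b : Int × String) => decide (b.1 < a.1)) x y = false := by
        intro y hy
        have h1 : y.1 = v := by simpa using (List.mem_filter.mp hy).2
        simp [h1, hxv]
      rw [pvInsertSkip _ x _ _ hskip]
      have hfront : ∀ y ∈ vt.flatMap (fun w => ps.filter (fun p => decide (p.1 = w))),
          (fun (a b : Int × String) => decide (b.1 < a.1)) x y = true := by
        intro y hy
        obtain ⟨w, hw, hyf⟩ := List.mem_flatMap.mp hy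
        have h1 : y.1 = w := by simpa using (List.mem_filter.mp hyf).2
        have h2 := hlt w hw
        simp only [decide_eq_true_eq, h1, hxv]
        omega
      rw [pvInsertFront _ x _ hfront]
      have hA : (ps ++ [x]).filter (fun p => decide (p.1 = v))
          = ps.filter (fun p => decide (p.1 = v)) ++ [x] := by
        simp [List.filter_append, hxv]
      have hB : vt.flatMap (fun w => (ps ++ [x]).filter (fun p => decide (p.1 = w)))
          = vt.flatMap (fun w => ps.filter (fun p => decide (p.1 = w))) := by
        apply pvFlatMapCongr
        intro w hw
        have h2 : ¬ (x.1 = w) := by have := hlt w hw; omega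
        simp [List.filter_append, h2]
      rw [hA, hB]
      simp
    · have hx' : x.1 ∈ vt := by
        cases List.mem_cons.mp hx with
        | inl h => exact absurd h hxv
        | inr h => exact h
      have hskip : ∀ y ∈ ps.filter (fun p => decide (p.1 = v)),
          (fun (a b : Int × String) => decide (b.1 < a.1)) x y = false := by
        intro y hy
        have h1 : y.1 = v := by simpa using (List.mem_filter.mp hy).2
        have h2 : x.1 < v := hlt _ hx'
        simp only [decide_eq_false_iff_not, h1]
        omega
      rw [pvInsertSkip _ x _ _ hskip, ih hvt hx']
      have hA : (ps ++ [x]).filter (fun p => decide (p.1 = v))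
          = ps.filter (fun p => decide (p.1 = v)) := by
        simp [List.filter_append, hxv]
      rw [hA]

-- stable descending sort of a list whose keys all lie in the strictly decreasing list vals
-- is the concatenation of the key groups, each in input order
lemma pvSortedGrouped (vals : List Int) (hv : vals.Pairwise (fun a b => b < a))
    (ps : List (Int × String)) (hps : ∀ p ∈ ps, p.1 ∈ vals) :
    PySem.List.sorted ps (fun it => it.1) true
      = vals.flatMap (fun v => ps.filter (fun p => decide (p.1 = v))) := by
  rw [PySem.List.sorted_rev_eq_foldl_insertBy]
  induction ps using List.reverseRecOn with
  | nil => simp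
  | append_singleton ps x ih =>
    rw [List.foldl_append]
    simp only [List.foldl_cons, List.foldl_nil]
    rw [ih (fun p hp => hps p (by simp [hp]))]
    exact pvInsertGrouped vals hv x (hps x (by simp)) ps

-- updating one bucket of a range-indexed bucket table
lemma pvSetGroup (n s : Nat) (hs : s < n) (g : Nat → List String) (x : String) :
    ((List.range n).map g).set s ((((List.range n).map g).getD s []) ++ [x])
      = (List.range n).map (fun j => g j ++ if j = s then [x] else []) := by
  have hg : ((List.range n).map g).getD s [] = g s := by
    rw [List.getD_eq_getElem _ _ (by simpa using hs)]
    simp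
  rw [hg]
  apply List.ext_getElem
  · simp
  · intro i h1 h2
    simp only [List.getElem_set, List.getElem_map, List.getElem_range]
    by_cases hi : s = i
    · subst hi; simp
    · rw [if_neg hi, if_neg (fun h : i = s => hi h.symm), List.append_nil]

-- the bucket-filling loop of B builds exactly the per-score filters of the processed lines
lemma pvBuckets (kws : List String) (ls : List String) :
    ls.foldl (fun buckets line =>
      if (kws.foldl (fun score kw =>
            if kw ≠ "" ∧ PySem.Str.isIn (PySem.Str.lower kw) (PySem.Str.lower line) then score + 1 else score) 0) ≠ 0
      then buckets.set
            ((kws.foldl (fun score kw =>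
              if kw ≠ "" ∧ PySem.Str.isIn (PySem.Str.lower kw) (PySem.Str.lower line) then score + 1 else score) 0) - 1)
            (buckets.getD
              ((kws.foldl (fun score kw =>
                if kw ≠ "" ∧ PySem.Str.isIn (PySem.Str.lower kw) (PySem.Str.lower line) then score + 1 else score) 0) - 1) [] ++ [line])
      else buckets)
      (List.replicate kws.length [])
      = (List.range kws.length).map (fun j => ls.filter (fun l => decide (pvScore kws l = j + 1))) := by
  induction ls using List.reverseRecOn with
  | nil =>
    simp [List.map_const']
  | append_singleton ls x ih =>
    rw [List.foldl_append]
    simp only [List.foldl_cons, List.foldl_nil]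
    rw [ih]
    simp only [pvCountLoop, Nat.zero_add]
    have hsc : kws.countP (fun kw => decide (kw ≠ "" ∧ PySem.Str.isIn (PySem.Str.lower kw) (PySem.Str.lower x))) = pvScore kws x := rfl
    rw [hsc]
    by_cases h0 : pvScore kws x = 0
    · rw [if_neg (by omega)]
      apply List.map_congr_left
      intro j hj
      simp [List.filter_append, h0]
    · rw [if_pos (by omega)]
      have hle : pvScore kws x ≤ kws.length := pvScore_le kws x
      rw [pvSetGroup kws.length (pvScore kws x - 1) (by omega)]
      apply List.map_congr_left
      intro j hj
      rw [List.filter_append]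
      by_cases hjs : j = pvScore kws x - 1
      · simp [hjs, show pvScore kws x - 1 + 1 = pvScore kws x from by omega]
      · have : ¬ (pvScore kws x = j + 1) := by omega
        simp [hjs, this]

-- slicing commutes with map
lemma pvSliceMap {α β : Type} (f : α → β) (l : List α) (b : Int) :
    (PySem.List.slice l none (some b)).map f = PySem.List.slice (l.map f) none (some b) := by
  simp [PySem.List.slice, List.map_take]

-- ===== VERDICT (by name: the statement is the Claim_ definition above) =====
theorem best_lines_py_spec : Claim_equal_best_lines_py := by
  intro lines current limit _
  unfold Spec_best_lines_py
  simp only [best_lines_py, best_lines_py_alt]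
  simp only [pvSumScore]
  rw [PySem.List.foldl_append_ite
      (p := fun line => ((pvScore (pvKeywords current) line : Int) ≠ 0))
      (f := fun line => ((pvScore (pvKeywords current) line : Int), line)) lines []]
  rw [List.nil_append]
  rw [pvBuckets (pvKeywords current) lines]
  rw [PySem.List.foldl_append_eq_flatMap, List.nil_append]
  have hv : ([10,9,8,7,6,5,4,3,2,1] : List Int).Pairwise (fun a b => b < a) := by decide
  have hlen : (pvKeywords current).length = 10 := rfl
  have hps : ∀ p ∈ (lines.filter (fun line => decide ((pvScore (pvKeywords current) line : Int) ≠ 0))).map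
      (fun line => ((pvScore (pvKeywords current) line : Int), line)),
      p.1 ∈ ([10,9,8,7,6,5,4,3,2,1] : List Int) := by
    intro p hp
    obtain ⟨l, hl, rfl⟩ := List.mem_map.mp hp
    have h1 : ¬ ((pvScore (pvKeywords current) l : Int) = 0) := by
      simpa using (List.mem_filter.mp hl).2
    have h2 : pvScore (pvKeywords current) l ≤ 10 := hlen ▸ pvScore_le (pvKeywords current) l
    have h3 : 1 ≤ pvScore (pvKeywords current) l := by omega
    simp only [List.mem_cons, List.not_mem_nil, or_false]
    omega
  rw [pvSortedGrouped _ hv _ hps]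
  rw [pvSliceMap]
  congr 1
  have hgetD : ∀ s ∈ (List.range (10:Nat)).reverse,
      ((List.range 10).map (fun j => lines.filter (fun l => decide (pvScore (pvKeywords current) l = j + 1)))).getD s []
        = lines.filter (fun l => decide (pvScore (pvKeywords current) l = s + 1)) := by
    intro s hs
    have hs' : s < 10 := by simpa using hs
    rw [List.getD_eq_getElem _ _ (by simpa using hs')]
    simp
  rw [hlen, pvFlatMapCongr hgetD]
  rw [List.map_flatMap]
  have hgrp : ∀ v ∈ ([10,9,8,7,6,5,4,3,2,1] : List Int),
      (((lines.filter (fun line => decide ((pvScore (pvKeywords current) line : Int) ≠ 0))).map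
          (fun line => ((pvScore (pvKeywords current) line : Int), line))).filter
            (fun p => decide (p.1 = v))).map (fun item => item.2)
        = lines.filter (fun l => decide ((pvScore (pvKeywords current) l : Int) = v)) := by
    intro v hvm
    have hvne : v ≠ 0 := by
      simp only [List.mem_cons, List.not_mem_nil, or_false] at hvm
      omega
    rw [List.filter_map, List.map_map, List.filter_filter]
    have hmapid : ((fun (item : Int × String) => item.2) ∘
        fun line => ((pvScore (pvKeywords current) line : Int), line)) = fun line : String => line := rfl
    rw [hmapid, List.map_id']
    apply List.filter_congr
    intro a _
    by_cases h : (pvScore (pvKeywords current) a : Int) = v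
    · simp [h, hvne]
    · simp [h]
  rw [pvFlatMapCongr hgrp]
  have hone : ∀ (v : Int) (s : Nat), v = (s : Int) + 1 →
      lines.filter (fun l => decide ((pvScore (pvKeywords current) l : Int) = v))
        = lines.filter (fun l => decide (pvScore (pvKeywords current) l = s + 1)) := by
    intro v s hv
    subst hv
    apply List.filter_congr
    intro a _
    by_cases h : pvScore (pvKeywords current) a = s + 1
    · simp [h]
    · simp [h]
      omega
  rw [show (List.range 10).reverse = [9,8,7,6,5,4,3,2,1,0] from by decide]
  simp only [List.flatMap_cons, List.flatMap_nil, List.append_nil]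
  rw [hone 10 9 (by norm_num), hone 9 8 (by norm_num), hone 8 7 (by norm_num),
      hone 7 6 (by norm_num), hone 6 5 (by norm_num), hone 5 4 (by norm_num),
      hone 4 3 (by norm_num), hone 3 2 (by norm_num), hone 2 1 (by norm_num),
      hone 1 0 (by norm_num)]
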